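-- pv_equiv track=rewrite | github.com/faserrao/c2m-api-v2-postman | scripts/ebnf_to_openapi_dynamic.py | _generate_operation_id
-- ===== SOURCE A (Python) =====
-- def _generate_operation_id(method: str, path: str) -> str:
--     """Generate an operation ID from method and path"""
--     # Convert path to camelCase operation ID
--     parts = path.strip('/').split('/')
--     operation_id = method.lower()
--     for part in parts:
--         # Remove path parameters
--         if '{' in part:
--             part = part.replace('{', '').replace('}', '')
--         # Convert to camelCase
--         words = part.split('-')
--         if words:
--             operation_id += words[0].capitalize()
--             for word in words[1:]:
--                 operation_id += word.capitalize()
--     return operation_id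
-- ===== SOURCE B (Python) =====
-- def _generate_operation_id(method: str, path: str) -> str:
--     # Flat tokenization: strip edge '/', drop brace chars once, treat '-' and '/'
--     # as the same separator, then one capitalize pass.
--     cleaned = path.strip('/').replace('{', '').replace('}', '').replace('-', '/')
--     return method.lower() + ''.join(w.capitalize() for w in cleaned.split('/'))
-- ===== Notes on version B (the rewrite author's own statement) =====
-- stated objective: simpler
-- what changed: A's nested per-segment/per-word loops with conditional brace stripping are replaced by one flat tokenization: strip edge '/', delete brace characters globally, unify '-' with '/', split once, and join the capitalized tokens.
-- intended difference: On paths where some '/'-segment contains '}' but no '{', A keeps the stray '}' in the operation id (e.g. 'getA}b') while B strips it ('getAb'); B's value is intended since braces are path-parameter markers and never belong in an operation id. — e.g. on _generate_operation_id("get", "a}b"): A returns "getA}b", B returns "getAb"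
import Mathlib
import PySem

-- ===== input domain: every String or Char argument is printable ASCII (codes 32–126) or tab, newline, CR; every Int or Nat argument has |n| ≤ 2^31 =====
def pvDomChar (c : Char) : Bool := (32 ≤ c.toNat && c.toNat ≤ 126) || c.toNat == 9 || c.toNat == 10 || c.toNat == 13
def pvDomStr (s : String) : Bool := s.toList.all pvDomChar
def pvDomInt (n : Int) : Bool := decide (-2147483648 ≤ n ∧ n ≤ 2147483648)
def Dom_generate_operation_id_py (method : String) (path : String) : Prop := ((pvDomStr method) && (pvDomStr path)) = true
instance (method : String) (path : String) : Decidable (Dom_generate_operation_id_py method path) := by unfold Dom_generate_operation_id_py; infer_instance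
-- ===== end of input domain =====

-- B flattens A's nested per-segment/per-word loops into one tokenization pass; on paths where a
-- segment has a stray '}' (no '{') B drops the brace that A accidentally keeps (see D_ below).

-- Python str.capitalize(): first char uppercased, rest lowercased (exact on the ASCII domain;
-- both Pythons call .capitalize(), so both ports share this helper).
def pyCapitalize (cs : List Char) : List Char :=
  match cs with
  | [] => []
  | c :: rest => PySem.Chars.upperChar c :: PySem.Chars.lower rest

-- ===== PORT A =====
def generate_operation_id_py (method : String) (path : String) : String :=
  let parts := PySem.Chars.splitOn (PySem.Chars.stripChars path.toList ['/']) ['/']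
  let operation_id := PySem.Chars.lower method.toList
  String.ofList (parts.foldl (fun operation_id part =>
    -- if '{' in part: part = part.replace('{','').replace('}','')
    let part := if PySem.Chars.isIn ['{'] part
      then PySem.Chars.replace (PySem.Chars.replace part ['{'] []) ['}'] [] else part
    let words := PySem.Chars.splitOn part ['-']
    match words with
    | [] => operation_id  -- 'if words:' — split never returns an empty list
    | w0 :: ws => ws.foldl (fun op w => op ++ pyCapitalize w) (operation_id ++ pyCapitalize w0))
    operation_id)

-- ===== PORT B =====
def generate_operation_id_py_alt (method : String) (path : String) : String :=
  let cleaned := PySem.Chars.replace (PySem.Chars.replace (PySem.Chars.replace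
      (PySem.Chars.stripChars path.toList ['/']) ['{'] []) ['}'] []) ['-'] ['/']
  String.ofList (PySem.Chars.lower method.toList ++
    PySem.Chars.join [] ((PySem.Chars.splitOn cleaned ['/']).map pyCapitalize))

-- ===== PRECONDITION & SPEC =====
-- On paths where some '/'-segment (after stripping edge '/') contains '}' but no '{', A keeps the
-- stray '}' in the operation id while B strips it; B's value is the intended one since braces are
-- path-parameter markers and never belong in an operation id.
def D_generate_operation_id_py (method : String) (path : String) : Prop :=
  ∃ seg ∈ PySem.Chars.splitOn (PySem.Chars.stripChars path.toList ['/']) ['/'],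
    '}' ∈ seg ∧ '{' ∉ seg
instance (method : String) (path : String) : Decidable (D_generate_operation_id_py method path) := by
  unfold D_generate_operation_id_py; infer_instance

def Spec_generate_operation_id_py (method : String) (path : String) (out : String) : Prop :=
  ¬ D_generate_operation_id_py method path → out = generate_operation_id_py_alt method path
instance (method : String) (path : String) (out : String) : Decidable (Spec_generate_operation_id_py method path out) := by
  unfold Spec_generate_operation_id_py; infer_instance

def pvDiffWitness_generate_operation_id_py : String × String := ("get", "a}b")
def pvDiffWitnessOut_generate_operation_id_py : String × String := ("getA}b", "getAb")

-- ===== CLAIM (what is proved, stated in full; the proofs are below) =====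
def Claim_unchanged_generate_operation_id_py : Prop := ∀ (method : String) (path : String), Dom_generate_operation_id_py method path → Spec_generate_operation_id_py method path (generate_operation_id_py method path)
def Claim_changed_generate_operation_id_py : Prop := Dom_generate_operation_id_py (pvDiffWitness_generate_operation_id_py.1) (pvDiffWitness_generate_operation_id_py.2) ∧ D_generate_operation_id_py (pvDiffWitness_generate_operation_id_py.1) (pvDiffWitness_generate_operation_id_py.2) ∧ generate_operation_id_py (pvDiffWitness_generate_operation_id_py.1) (pvDiffWitness_generate_operation_id_py.2) = pvDiffWitnessOut_generate_operation_id_py.1 ∧ generate_operation_id_py_alt (pvDiffWitness_generate_operation_id_py.1) (pvDiffWitness_generate_operation_id_py.2) = pvDiffWitnessOut_generate_operation_id_py.2 ∧ pvDiffWitnessOut_generate_operation_id_py.1 ≠ pvDiffWitnessOut_generate_operation_id_py.2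
def Claim_exact_generate_operation_id_py : Prop := ∀ (method : String) (path : String), Dom_generate_operation_id_py method path → D_generate_operation_id_py method path → generate_operation_id_py method path ≠ generate_operation_id_py_alt method path

-- ===== LEMMAS AND PROOFS =====

-- structural single-character split (what s.split(c) computes for a one-char separator)
def splitC (a : Char) : List Char → List (List Char)
  | [] => [[]]
  | c :: rest => if c = a then [] :: splitC a rest else (splitC a rest).modifyHead (c :: ·)

-- A's per-segment cleaning and camel-casing, as named functions
def filt2 (l : List Char) : List Char := (l.filter (· ≠ '{')).filter (· ≠ '}')
def cleanA (part : List Char) : List Char := if '{' ∈ part then filt2 part else part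
def capJoin (part : List Char) : List Char := ((splitC '-' part).map pyCapitalize).flatten

theorem splitC_shape (a : Char) (l : List Char) : ∃ h t, splitC a l = h :: t := by
  induction l with
  | nil => exact ⟨[], [], rfl⟩
  | cons c rest ih =>
    obtain ⟨h, t, hsp⟩ := ih
    by_cases hc : c = a
    · exact ⟨[], splitC a rest, by simp [splitC, hc]⟩
    · exact ⟨c :: h, t, by simp [splitC, hc, hsp]⟩

theorem splitOn_go_eq (a : Char) : ∀ (fuel : Nat) (l cur : List Char) (acc : List (List Char)),
    l.length ≤ fuel →
    PySem.Chars.splitOn.go [a] fuel l cur acc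
      = acc.reverse ++ (splitC a l).modifyHead (cur.reverse ++ ·) := by
  intro fuel
  induction fuel with
  | zero =>
    intro l cur acc hl
    have : l = [] := List.eq_nil_of_length_eq_zero (Nat.le_zero.mp hl)
    subst this
    simp [PySem.Chars.splitOn.go, splitC]
  | succ n ih =>
    intro l cur acc hl
    cases l with
    | nil => simp [PySem.Chars.splitOn.go, splitC]
    | cons c rest =>
      simp only [PySem.Chars.splitOn.go]
      by_cases hc : c = a
      · subst hc
        have hpre : List.isPrefixOf [c] (c :: rest) = true := by simp [List.isPrefixOf]
        rw [if_pos hpre]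
        simp only [List.length_singleton, List.drop_one, List.tail_cons]
        rw [ih rest [] _ (by simpa using Nat.le_of_succ_le_succ hl)]
        obtain ⟨h, t, hsp⟩ := splitC_shape c rest
        simp [splitC, hsp]
      · have hpre : List.isPrefixOf [a] (c :: rest) = false := by
          simp [List.isPrefixOf]; exact fun h => absurd h.symm hc
        rw [if_neg (by simp [hpre])]
        rw [ih rest (c :: cur) acc (by simpa using Nat.le_of_succ_le_succ hl)]
        obtain ⟨h, t, hsp⟩ := splitC_shape a rest
        simp [splitC, hc, hsp]

theorem splitOn_single (s : List Char) (a : Char) :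
    PySem.Chars.splitOn s [a] = splitC a s := by
  rw [PySem.Chars.splitOn, splitOn_go_eq a (s.length + 1) s [] [] (by omega)]
  obtain ⟨h, t, hsp⟩ := splitC_shape a s
  simp [hsp]

theorem replace_go_single (a : Char) (new : List Char) : ∀ (fuel : Nat) (l acc : List Char),
    l.length ≤ fuel →
    PySem.Chars.replace.go [a] new fuel l acc
      = acc.reverse ++ l.flatMap (fun c => if c = a then new else [c]) := by
  intro fuel
  induction fuel with
  | zero =>
    intro l acc hl
    have : l = [] := List.eq_nil_of_length_eq_zero (Nat.le_zero.mp hl)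
    subst this
    simp [PySem.Chars.replace.go]
  | succ n ih =>
    intro l acc hl
    cases l with
    | nil => simp [PySem.Chars.replace.go]
    | cons c rest =>
      simp only [PySem.Chars.replace.go]
      by_cases hc : c = a
      · subst hc
        have hpre : List.isPrefixOf [c] (c :: rest) = true := by simp [List.isPrefixOf]
        rw [if_pos hpre]
        simp only [List.length_singleton, List.drop_one, List.tail_cons]
        rw [ih rest _ (by simpa using Nat.le_of_succ_le_succ hl)]
        simp
      · have hpre : List.isPrefixOf [a] (c :: rest) = false := by
          simp [List.isPrefixOf]; exact fun h => absurd h.symm hc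
        rw [if_neg (by simp [hpre])]
        rw [ih rest (c :: acc) (by simpa using Nat.le_of_succ_le_succ hl)]
        simp [hc]

theorem replace_single (a : Char) (new : List Char) (s : List Char) :
    PySem.Chars.replace s [a] new = s.flatMap (fun c => if c = a then new else [c]) := by
  rw [PySem.Chars.replace]
  simp only [List.isEmpty_cons]
  exact replace_go_single a new s.length s [] le_rfl

theorem replace_remove (s : List Char) (a : Char) :
    PySem.Chars.replace s [a] [] = s.filter (· ≠ a) := by
  rw [replace_single]
  induction s with
  | nil => rfl
  | cons c rest ih => by_cases hc : c = a <;> simp [hc, ih]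

theorem replace_swap (s : List Char) (a b : Char) :
    PySem.Chars.replace s [a] [b] = s.map (fun c => if c = a then b else c) := by
  rw [replace_single]
  induction s with
  | nil => rfl
  | cons c rest ih => by_cases hc : c = a <;> simp [hc, ih]

theorem join_nil_eq_flatten (parts : List (List Char)) :
    PySem.Chars.join [] parts = parts.flatten := by
  simp only [PySem.Chars.join]
  induction parts with
  | nil => rfl
  | cons p rest ih =>
    have hstep : List.intercalate ([] : List Char) (p :: rest) = p ++ [].intercalate rest := by
      simp [List.intercalate]
      cases rest with
      | nil => simp
      | cons q t => simp [List.intersperse]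
    rw [hstep, ih]; simp

theorem isIn_singleton (a : Char) (s : List Char) :
    PySem.Chars.isIn [a] s = true ↔ a ∈ s := by
  rw [PySem.Chars.isIn_iff_infix]; exact List.singleton_infix_iff a s

-- splitting commutes with deleting characters the filter keeps the separator of
theorem splitC_filter (p : Char → Bool) (sep : Char) (hp : p sep = true) (l : List Char) :
    splitC sep (l.filter p) = (splitC sep l).map (List.filter p) := by
  induction l with
  | nil => simp [splitC]
  | cons c rest ih =>
    obtain ⟨h, t, hsp⟩ := splitC_shape sep rest
    by_cases hpc : p c = true
    · by_cases hcs : c = sep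
      · subst hcs
        simp [List.filter_cons, hpc, splitC, ih]
      · simp [List.filter_cons, hpc, splitC, hcs, ih, hsp]
    · have hcs : c ≠ sep := fun h => hpc (h ▸ hp)
      simp only [List.filter_cons, hpc, Bool.false_eq_true, ite_false]
      rw [ih]
      simp [splitC, hcs, hsp, List.filter_cons, hpc]

-- splitting on sep after mapping a→sep = splitting on sep, then each piece on a
theorem splitC_swap (a sep : Char) (hne : a ≠ sep) (l : List Char) :
    splitC sep (l.map (fun c => if c = a then sep else c))
      = (splitC sep l).flatMap (splitC a) := by
  induction l with
  | nil => simp [splitC]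
  | cons c rest ih =>
    obtain ⟨h, t, hsp⟩ := splitC_shape sep rest
    by_cases hcs : c = sep
    · subst hcs
      have hna : ¬ (c = a) := fun h => hne (h.symm)
      simp only [List.map_cons, if_neg hna]
      simp [splitC, ih]
    · by_cases hca : c = a
      · subst hca
        simp only [List.map_cons, if_pos rfl]
        simp only [splitC, if_pos rfl, ih, hsp]
        simp [hcs, List.flatMap_cons, splitC]
      · simp only [List.map_cons, if_neg hca]
        obtain ⟨h2, t2, hsp2⟩ := splitC_shape a h
        simp only [splitC, if_neg hcs, ih, hsp]
        simp [List.flatMap_cons, hsp2, splitC, hca, hcs]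

theorem flatten_flatMap {α : Type} (f : α → List (List Char)) (l : List α) :
    (l.flatMap f).flatten = l.flatMap (fun x => (f x).flatten) := by
  induction l with
  | nil => rfl
  | cons x rest ih => simp [List.flatMap_cons, ih]

-- A's cleaning step, named
theorem cleanA_eq (part : List Char) :
    (if PySem.Chars.isIn ['{'] part
      then PySem.Chars.replace (PySem.Chars.replace part ['{'] []) ['}'] [] else part)
      = cleanA part := by
  by_cases hin : '{' ∈ part
  · rw [if_pos ((isIn_singleton _ _).mpr hin)]
    rw [cleanA, if_pos hin, replace_remove, replace_remove]
    rfl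
  · rw [if_neg (fun h => hin ((isIn_singleton _ _).mp h))]
    rw [cleanA, if_neg hin]

-- A's inner word loop produces capJoin
theorem matchCap (op part : List Char) :
    (match splitC '-' part with
      | [] => op
      | w0 :: ws => ws.foldl (fun o w => o ++ pyCapitalize w) (op ++ pyCapitalize w0))
      = op ++ capJoin part := by
  obtain ⟨h, t, hsp⟩ := splitC_shape '-' part
  rw [capJoin, hsp]
  simp [PySem.List.foldl_append_eq_flatMap]

-- A's outer loop in closed form
theorem foldA (parts : List (List Char)) (init : List Char) :
    parts.foldl (fun operation_id part =>
      let part := if PySem.Chars.isIn ['{'] part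
        then PySem.Chars.replace (PySem.Chars.replace part ['{'] []) ['}'] [] else part
      let words := PySem.Chars.splitOn part ['-']
      match words with
      | [] => operation_id
      | w0 :: ws => ws.foldl (fun op w => op ++ pyCapitalize w) (operation_id ++ pyCapitalize w0))
      init
    = init ++ parts.flatMap (fun seg => capJoin (cleanA seg)) := by
  induction parts generalizing init with
  | nil => simp
  | cons seg rest ih =>
    rw [List.foldl_cons, ih]
    show (match PySem.Chars.splitOn (if PySem.Chars.isIn ['{'] seg
        then PySem.Chars.replace (PySem.Chars.replace seg ['{'] []) ['}'] [] else seg) ['-'] with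
      | [] => init
      | w0 :: ws => ws.foldl (fun op w => op ++ pyCapitalize w) (init ++ pyCapitalize w0))
        ++ rest.flatMap (fun seg => capJoin (cleanA seg))
      = init ++ (seg :: rest).flatMap (fun seg => capJoin (cleanA seg))
    rw [cleanA_eq, splitOn_single, matchCap, List.flatMap_cons, ← List.append_assoc]

theorem A_norm (method path : String) :
    generate_operation_id_py method path
      = String.ofList (PySem.Chars.lower method.toList ++
          (splitC '/' (PySem.Chars.stripChars path.toList ['/'])).flatMap
            (fun seg => capJoin (cleanA seg))) := by
  show String.ofList ((PySem.Chars.splitOn (PySem.Chars.stripChars path.toList ['/']) ['/']).foldl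
      _ (PySem.Chars.lower method.toList)) = _
  rw [splitOn_single, foldA]

theorem B_norm (method path : String) :
    generate_operation_id_py_alt method path
      = String.ofList (PySem.Chars.lower method.toList ++
          (splitC '/' (PySem.Chars.stripChars path.toList ['/'])).flatMap
            (fun seg => capJoin (filt2 seg))) := by
  show String.ofList (PySem.Chars.lower method.toList ++
      PySem.Chars.join [] ((PySem.Chars.splitOn (PySem.Chars.replace (PySem.Chars.replace
        (PySem.Chars.replace (PySem.Chars.stripChars path.toList ['/']) ['{'] []) ['}'] [])
        ['-'] ['/']) ['/']).map pyCapitalize)) = _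
  rw [replace_remove, replace_remove, replace_swap, splitOn_single,
    splitC_swap '-' '/' (by decide),
    splitC_filter _ '/' (by decide), splitC_filter _ '/' (by decide),
    join_nil_eq_flatten]
  congr 1
  rw [List.map_map, List.flatMap_map, List.map_flatMap, flatten_flatMap]
  rfl

-- segment-level facts used by the tight claim
theorem mem_splitC_exists (sep c : Char) (l : List Char) (hmem : c ∈ l) (hne : c ≠ sep) :
    ∃ w ∈ splitC sep l, c ∈ w := by
  induction l with
  | nil => cases hmem
  | cons x rest ih =>
    obtain ⟨h, t, hsp⟩ := splitC_shape sep rest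
    rcases List.mem_cons.mp hmem with hcx | hm
    · subst hcx
      refine ⟨c :: h, ?_, List.mem_cons_self⟩
      rw [splitC, if_neg (fun he => hne he), hsp]
      exact List.mem_cons_self
    · obtain ⟨w, hw, hcw⟩ := ih hm
      by_cases hxs : x = sep
      · exact ⟨w, by rw [splitC, if_pos hxs]; exact List.mem_cons_of_mem _ hw, hcw⟩
      · rw [hsp] at hw
        rcases List.mem_cons.mp hw with hwh | hwt
        · subst hwh
          exact ⟨x :: w, by rw [splitC, if_neg hxs, hsp]; exact List.mem_cons_self,
            List.mem_cons_of_mem _ hcw⟩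
        · exact ⟨w, by rw [splitC, if_neg hxs, hsp]; exact List.mem_cons_of_mem _ hwt, hcw⟩

theorem mem_of_mem_splitC (sep c : Char) (l w : List Char)
    (hw : w ∈ splitC sep l) (hcw : c ∈ w) : c ∈ l := by
  induction l generalizing w with
  | nil =>
    simp [splitC] at hw
    subst hw; cases hcw
  | cons x rest ih =>
    obtain ⟨h, t, hsp⟩ := splitC_shape sep rest
    by_cases hxs : x = sep
    · rw [splitC, if_pos hxs] at hw
      rcases List.mem_cons.mp hw with hwn | hwt
      · subst hwn; cases hcw
      · exact List.mem_cons_of_mem _ (ih w hwt hcw)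
    · rw [splitC, if_neg hxs, hsp] at hw
      rcases List.mem_cons.mp hw with hwh | hwt
      · subst hwh
        rcases List.mem_cons.mp hcw with hcx | hch
        · exact hcx ▸ List.mem_cons_self
        · exact List.mem_cons_of_mem _
            (ih h (by rw [hsp]; exact List.mem_cons_self) hch)
      · exact List.mem_cons_of_mem _
          (ih w (by rw [hsp]; exact List.mem_cons_of_mem _ hwt) hcw)

theorem upperChar_eq_rbrace (c : Char) (h : PySem.Chars.upperChar c = '}') : c = '}' := by
  unfold PySem.Chars.upperChar PySem.Chars.islower at h
  split at h
  · next hl =>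
    simp only [Bool.and_eq_true, decide_eq_true_eq, Char.le_def, UInt32.le_iff_toNat_le] at hl
    obtain ⟨hl1, hl2⟩ := hl
    have hc1 : 97 ≤ c.toNat := hl1
    have hc2 : c.toNat ≤ 122 := hl2
    have hv : (c.toNat - 32).isValidChar := Or.inl (by omega)
    have h2 := congrArg Char.toNat h
    rw [Char.toNat_ofNat, if_pos hv] at h2
    have h125 : ('}' : Char).toNat = 125 := rfl
    rw [h125] at h2
    omega
  · exact h

theorem lowerChar_eq_rbrace (c : Char) (h : PySem.Chars.lowerChar c = '}') : c = '}' := by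
  unfold PySem.Chars.lowerChar PySem.Chars.isupper at h
  split at h
  · next hl =>
    simp only [Bool.and_eq_true, decide_eq_true_eq, Char.le_def, UInt32.le_iff_toNat_le] at hl
    obtain ⟨hl1, hl2⟩ := hl
    have hc1 : 65 ≤ c.toNat := hl1
    have hc2 : c.toNat ≤ 90 := hl2
    have hv : (c.toNat + 32).isValidChar := Or.inl (by omega)
    have h2 := congrArg Char.toNat h
    rw [Char.toNat_ofNat, if_pos hv] at h2
    have h125 : ('}' : Char).toNat = 125 := rfl
    rw [h125] at h2
    omega
  · exact h

theorem rbrace_mem_cap (w : List Char) (h : '}' ∈ w) : '}' ∈ pyCapitalize w := by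
  cases w with
  | nil => cases h
  | cons c rest =>
    rcases List.mem_cons.mp h with hh | hm
    · subst hh
      have : PySem.Chars.upperChar '}' = '}' := by decide
      rw [pyCapitalize, this]
      exact List.mem_cons_self
    · refine List.mem_cons_of_mem _ ?_
      rw [PySem.Chars.lower]
      exact List.mem_map.mpr ⟨'}', hm, by decide⟩

theorem rbrace_of_mem_cap (w : List Char) (h : '}' ∈ pyCapitalize w) : '}' ∈ w := by
  cases w with
  | nil => cases h
  | cons c rest =>
    rcases List.mem_cons.mp h with hh | hm
    · exact (upperChar_eq_rbrace c hh.symm) ▸ List.mem_cons_self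
    · rw [PySem.Chars.lower] at hm
      obtain ⟨c', hc', he⟩ := List.mem_map.mp hm
      exact List.mem_cons_of_mem _ ((lowerChar_eq_rbrace c' he) ▸ hc')

theorem string_ofList_inj (s t : List Char) (h : String.ofList s = String.ofList t) : s = t := by
  have := congrArg String.toList h
  simpa using this

-- ===== VERDICT (by name: the statement is the Claim_ definition above) =====
theorem generate_operation_id_py_spec : Claim_unchanged_generate_operation_id_py := by
  intro method path _ hnd
  rw [A_norm, B_norm]
  congr 1
  congr 1
  apply List.flatMap_congr  -- may need different name
  intro seg hseg
  rw [D_generate_operation_id_py] at hnd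
  push Not at hnd
  rw [splitOn_single] at hnd
  by_cases hin : '{' ∈ seg
  · rw [cleanA, if_pos hin]
  · have hnr : '}' ∉ seg := fun hr => hin (hnd seg hseg hr)
    have h1 : seg.filter (· ≠ '{') = seg :=
      List.filter_eq_self.mpr (fun c hc => by
        simp only [ne_eq, decide_not, Bool.not_eq_eq_eq_not, Bool.not_true, decide_eq_false_iff_not]
        exact fun h => hin (by rw [← h]; exact hc))
    have h2 : seg.filter (· ≠ '}') = seg :=
      List.filter_eq_self.mpr (fun c hc => by
        simp only [ne_eq, decide_not, Bool.not_eq_eq_eq_not, Bool.not_true, decide_eq_false_iff_not]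
        exact fun h => hnr (by rw [← h]; exact hc))
    rw [cleanA, if_neg hin, filt2, h1, h2]

theorem generate_operation_id_py_changed : Claim_changed_generate_operation_id_py := by
  unfold Claim_changed_generate_operation_id_py; decide

theorem generate_operation_id_py_tight : Claim_exact_generate_operation_id_py := by
  intro method path _ hd heq
  rw [D_generate_operation_id_py] at hd
  obtain ⟨seg, hseg, hr, hnl⟩ := hd
  rw [splitOn_single] at hseg
  rw [A_norm, B_norm] at heq
  have hlists := string_ofList_inj _ _ heq
  have hrest := List.append_cancel_left hlists
  -- '}' occurs in A's tail
  have hmemA : '}' ∈ (splitC '/' (PySem.Chars.stripChars path.toList ['/'])).flatMap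
      (fun seg => capJoin (cleanA seg)) := by
    apply List.mem_flatMap.mpr
    refine ⟨seg, hseg, ?_⟩
    rw [cleanA, if_neg hnl, capJoin]
    obtain ⟨w, hw, hcw⟩ := mem_splitC_exists '-' '}' seg hr (by decide)
    exact List.mem_flatten.mpr ⟨pyCapitalize w, List.mem_map.mpr ⟨w, hw, rfl⟩, rbrace_mem_cap w hcw⟩
  -- but never in B's tail
  have hmemB : '}' ∉ (splitC '/' (PySem.Chars.stripChars path.toList ['/'])).flatMap
      (fun seg => capJoin (filt2 seg)) := by
    intro hmem
    obtain ⟨seg', _, hin⟩ := List.mem_flatMap.mp hmem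
    rw [capJoin] at hin
    obtain ⟨cw, hcwmem, hincw⟩ := List.mem_flatten.mp hin
    obtain ⟨w, hw, rfl⟩ := List.mem_map.mp hcwmem
    have : '}' ∈ filt2 seg' := mem_of_mem_splitC '-' '}' _ w hw (rbrace_of_mem_cap w hincw)
    rw [filt2] at this
    have := List.of_mem_filter this
    simp at this
  exact hmemB (hrest ▸ hmemA)
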